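-- pv_equiv track=rewrite | github.com/treegem/AdvendOfCode2020 | src/main/day4/day4.py | extract_raw_passports
-- ===== SOURCE A (Python) =====
-- from typing import List, Dict
--
-- def extract_raw_passports(input_lines: List[str]) -> List[List[str]]:
--     raw_passports = []
--     current_passport = []
--     for i, line in enumerate(input_lines):
--         if line == '':
--             raw_passports.append(current_passport)
--             current_passport = []
--         elif is_last_line(i, len(input_lines)):
--             current_passport.append(line)
--             raw_passports.append(current_passport)
--         else:
--             current_passport.append(line)
--     return raw_passports
--
-- def is_last_line(index: int, lines_length: int):
--     return index == lines_length - 1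
-- ===== SOURCE B (Python) =====
-- def extract_raw_passports(input_lines):
--     # Split at each blank line found with list.index, slicing out the blocks.
--     res = []
--     start = 0
--     while True:
--         try:
--             i = input_lines.index('', start)
--         except ValueError:
--             break
--         res.append(input_lines[start:i])
--         start = i + 1
--     if start < len(input_lines):
--         res.append(input_lines[start:])
--     return res
-- ===== Notes on version B (the rewrite author's own statement) =====
-- stated objective: faster
-- what changed: A's single indexed Python-level loop carrying an open-block accumulator (with an is_last_line special case) is replaced by iterated splitting: repeatedly find the next blank line with list.index(start) and append the slice between the previous and current blank, plus the trailing slice if non-empty.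
import Mathlib
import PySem

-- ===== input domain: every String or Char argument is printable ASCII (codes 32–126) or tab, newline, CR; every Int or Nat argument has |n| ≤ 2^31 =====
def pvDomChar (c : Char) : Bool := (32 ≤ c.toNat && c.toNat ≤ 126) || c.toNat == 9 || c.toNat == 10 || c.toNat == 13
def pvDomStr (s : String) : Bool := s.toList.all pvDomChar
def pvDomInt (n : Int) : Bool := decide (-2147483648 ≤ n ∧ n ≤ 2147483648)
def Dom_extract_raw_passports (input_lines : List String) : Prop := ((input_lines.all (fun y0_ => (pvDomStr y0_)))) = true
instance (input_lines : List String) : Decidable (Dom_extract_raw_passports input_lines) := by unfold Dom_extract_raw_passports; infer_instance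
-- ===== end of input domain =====

-- B replaces A's enumerate-and-accumulate loop by iterated splitting at the next blank
-- line found with list.index(start); alternative decomposition, same O(n) cost.

-- ===== PORT A =====
def is_last_line (index : Int) (lines_length : Int) : Bool := index == lines_length - 1

def extract_raw_passports (input_lines : List String) : List (List String) :=
  ((PySem.List.enumerate input_lines 0).foldl
    (fun (st : List (List String) × List String) p =>
      if p.2 = "" then (st.1 ++ [st.2], [])
      else if is_last_line p.1 (input_lines.length : Int) then
        (st.1 ++ [st.2 ++ [p.2]], st.2 ++ [p.2])
      else (st.1, st.2 ++ [p.2]))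
    ([], [])).1

-- ===== PORT B =====
-- the while loop of Source B; `input_lines.index('', start)` is ported as index? on the
-- suffix `drop start`, shifted by start (exact: Python searches from position start on)
def altGo (input_lines : List String) (res : List (List String)) (start : Nat) :
    List (List String) :=
  match h : PySem.List.index? (input_lines.drop start) "" with
  | some j =>
      altGo input_lines
        (res ++ [PySem.List.slice input_lines (some (start : Int)) (some ((start + j : Nat) : Int))])
        (start + j + 1)
  | none =>
      if start < input_lines.length then
        res ++ [PySem.List.slice input_lines (some (start : Int)) none]
      else res
termination_by input_lines.length - start
decreasing_by
  have hm : "" ∈ input_lines.drop start :=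
    (PySem.List.index?_isSome_iff (xs := input_lines.drop start) (v := "")).mp (by rw [h]; simp)
  have := List.length_pos_of_mem hm
  simp at this
  omega


def extract_raw_passports_alt (input_lines : List String) : List (List String) :=
  altGo input_lines [] 0

-- ===== PRECONDITION & SPEC =====
def Spec_extract_raw_passports (input_lines : List String) (out : List (List String)) : Prop := out = extract_raw_passports_alt input_lines
instance (input_lines : List String) (out : List (List String)) : Decidable (Spec_extract_raw_passports input_lines out) := by unfold Spec_extract_raw_passports; infer_instance

-- ===== CLAIM (what is proved, stated in full; the proofs are below) =====
def Claim_equal_extract_raw_passports : Prop := ∀ (input_lines : List String), Dom_extract_raw_passports input_lines → Spec_extract_raw_passports input_lines (extract_raw_passports input_lines)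

-- ===== LEMMAS AND PROOFS =====

def bRec (l : List String) : List (List String) :=
  if l = [] then []
  else
    match hi : PySem.List.index? l "" with
    | some i => l.take i :: bRec (l.drop (i + 1))
    | none => [l]
termination_by l.length
decreasing_by
  have hm : "" ∈ l := (PySem.List.index?_isSome_iff (xs := l) (v := "")).mp (by rw [hi]; simp)
  have := List.length_pos_of_mem hm
  simp; omega

theorem bRec_nil : bRec [] = [] := by rw [bRec.eq_def]; simp

theorem bRec_some {l : List String} {i : Nat} (hl : l ≠ [])
    (hi : PySem.List.index? l "" = some i) :
    bRec l = l.take i :: bRec (l.drop (i + 1)) := by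
  rw [bRec.eq_def, if_neg hl]
  split
  · rename_i i' h; rw [hi] at h; cases h; rfl
  · rename_i h; rw [hi] at h; cases h

theorem bRec_none {l : List String} (hl : l ≠ [])
    (hi : PySem.List.index? l "" = none) : bRec l = [l] := by
  rw [bRec.eq_def, if_neg hl]
  split
  · rename_i i' h; rw [hi] at h; cases h
  · rfl

theorem bRec_eq_nil_iff (l : List String) : bRec l = [] ↔ l = [] := by
  constructor
  · intro hb
    by_contra hl
    cases hi : PySem.List.index? l "" with
    | some i => rw [bRec_some hl hi] at hb; cases hb
    | none => rw [bRec_none hl hi] at hb; cases hb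
  · intro h; subst h; exact bRec_nil

theorem bRec_blank_cons (rest : List String) : bRec ("" :: rest) = [] :: bRec rest := by
  rw [bRec_some (by simp) (PySem.List.index?_cons_self (x := "") (xs := rest))]
  simp

theorem bRec_cons_nonblank (x : String) (rest : List String) (hx : x ≠ "") :
    bRec (x :: rest) = match bRec rest with
      | [] => [[x]]
      | b :: bs => (x :: b) :: bs := by
  have hcons := PySem.List.index?_cons_of_ne (x := x) (xs := rest) (v := "") hx
  cases hi : PySem.List.index? rest "" with
  | none =>
    have h2 : PySem.List.index? (x :: rest) "" = none := by rw [hcons, hi]; rfl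
    rw [bRec_none (by simp) h2]
    cases hr : rest with
    | nil => simp [bRec_nil]
    | cons y rs => rw [← hr, bRec_none (by simp [hr]) hi]
  | some j =>
    have h2 : PySem.List.index? (x :: rest) "" = some (j + 1) := by rw [hcons, hi]; rfl
    have hrest : rest ≠ [] := by
      intro hr; subst hr
      simp [PySem.List.index?_eq_idxOf?, List.idxOf?] at hi
    rw [bRec_some (by simp) h2, bRec_some hrest hi]
    simp

def aRec : List String → List String → List (List String)
  | _, [] => []
  | cur, x :: rest =>
    if x = "" then cur :: aRec [] rest
    else if rest = [] then [cur ++ [x]]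
    else aRec (cur ++ [x]) rest

theorem aRec_eq_bRec (l : List String) :
    ∀ cur, aRec cur l = match bRec l with
      | [] => []
      | b :: bs => (cur ++ b) :: bs := by
  induction l with
  | nil => intro cur; simp [aRec, bRec_nil]
  | cons x rest ih =>
    intro cur
    by_cases hx : x = ""
    · subst hx
      rw [bRec_blank_cons]
      simp only [aRec]
      rw [ih []]
      cases h : bRec rest with
      | nil => simp
      | cons b bs => simp
    · rw [bRec_cons_nonblank x rest hx]
      cases hr : rest with
      | nil => simp [aRec, hx, bRec_nil]
      | cons y rs =>
        have hne : rest ≠ [] := by simp [hr]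
        rw [← hr]
        rw [show aRec cur (x :: rest) = aRec (cur ++ [x]) rest by simp [aRec, hx, hne]]
        rw [ih (cur ++ [x])]
        cases h : bRec rest with
        | nil => exact absurd ((bRec_eq_nil_iff rest).mp h) hne
        | cons b bs => simp

theorem altGo_eq (input_lines : List String) :
    ∀ (fuel start : Nat) (res : List (List String)), input_lines.length - start ≤ fuel →
      altGo input_lines res start = res ++ bRec (input_lines.drop start) := by
  intro fuel
  induction fuel with
  | zero =>
    intro start res hf
    have hdrop : input_lines.drop start = [] := by
      apply List.eq_nil_of_length_eq_zero; simp; omega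
    rw [altGo.eq_def]
    split
    · rename_i j h; rw [hdrop] at h
      simp [PySem.List.index?_eq_idxOf?, List.idxOf?] at h
    · rw [if_neg (by omega), hdrop, bRec_nil]; simp
  | succ fuel ih =>
    intro start res hf
    rw [altGo.eq_def]
    split
    · rename_i j h
      have hm : "" ∈ input_lines.drop start :=
        (PySem.List.index?_isSome_iff (xs := input_lines.drop start) (v := "")).mp (by rw [h]; simp)
      have hpos := List.length_pos_of_mem hm
      have hlt : start < input_lines.length := by simp at hpos; omega
      rw [ih (start + j + 1) _ (by omega)]
      have hslice : PySem.List.slice input_lines (some (start : Int)) (some ((start + j : Nat) : Int)) =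
          (input_lines.drop start).take j := by
        rw [PySem.List.slice_natCast]; congr 1; omega
      have hne : input_lines.drop start ≠ [] := by
        intro hc; rw [hc] at hpos; simp at hpos
      rw [bRec_some hne h, hslice]
      simp [List.drop_drop]
      rw [Nat.add_assoc]
    · rename_i h
      split
      · rename_i hlt
        have hne : input_lines.drop start ≠ [] := by
          intro hc
          have := congrArg List.length hc; simp at this; omega
        rw [bRec_none hne h, PySem.List.slice_from_natCast]
      · rename_i hge
        have hdrop : input_lines.drop start = [] := by
          apply List.eq_nil_of_length_eq_zero; simp; omega
        rw [hdrop, bRec_nil]; simp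

theorem foldA (n : Nat) (rest : List String) :
    ∀ (k : Int) (raws : List (List String)) (cur : List String),
      k + rest.length = (n : Int) →
      ((PySem.List.enumerate rest k).foldl
        (fun (st : List (List String) × List String) p =>
          if p.2 = "" then (st.1 ++ [st.2], [])
          else if is_last_line p.1 (n : Int) then
            (st.1 ++ [st.2 ++ [p.2]], st.2 ++ [p.2])
          else (st.1, st.2 ++ [p.2]))
        (raws, cur)).1 = raws ++ aRec cur rest := by
  induction rest with
  | nil => intro k raws cur _; simp [PySem.List.enumerate_nil, aRec]
  | cons x rest ih =>
    intro k raws cur hk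
    rw [PySem.List.enumerate_cons]
    simp only [List.foldl_cons]
    by_cases hx : x = ""
    · subst hx
      rw [if_pos rfl]
      rw [ih (k + 1) (raws ++ [cur]) [] (by push_cast [List.length_cons] at hk ⊢; omega)]
      simp [aRec]
    · simp only [if_neg hx]
      by_cases hlast : k = (n : Int) - 1
      · have hrest : rest = [] := by
          have : (rest.length : Int) = 0 := by push_cast [List.length_cons] at hk; omega
          simpa using this
        subst hrest
        simp [is_last_line, hlast, PySem.List.enumerate_nil, aRec, hx]
      · have hrest : rest ≠ [] := by
          intro hr; subst hr; simp at hk; omega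
        have : is_last_line k (n : Int) = false := by
          simp [is_last_line]; omega
        rw [this]
        simp only [Bool.false_eq_true, if_false]
        rw [ih (k + 1) raws (cur ++ [x]) (by push_cast [List.length_cons] at hk ⊢; omega)]
        simp [aRec, hx, hrest]

-- ===== VERDICT (by name: the statement is the Claim_ definition above) =====
theorem extract_raw_passports_spec : Claim_equal_extract_raw_passports := by
  intro input_lines _
  unfold Spec_extract_raw_passports extract_raw_passports extract_raw_passports_alt
  rw [foldA input_lines.length input_lines 0 [] [] (by simp)]
  rw [altGo_eq input_lines input_lines.length 0 [] (by omega)]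
  simp only [List.nil_append, List.drop_zero]
  rw [aRec_eq_bRec input_lines []]
  cases h : bRec input_lines with
  | nil => rfl
  | cons b bs => simp
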